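-- pv_equiv track=rewrite | github.com/alessandropacielli/deepcomedy | nlgpoetry/utils.py | get_context_dataset
-- ===== SOURCE A (Python) =====
-- def get_context_dataset(sequences):
--     x_seq = []
--     for seq in sequences:
--         for i, c_verse in enumerate(seq):
--             context = []
--             [context.extend(v) for v in seq[:i]]
--             x_seq.append((context, c_verse))
--
--     return x_seq
-- ===== SOURCE B (Python) =====
-- def get_context_dataset(sequences):
--     x_seq = []
--     for seq in sequences:
--         context = []
--         for c_verse in seq:
--             x_seq.append((list(context), c_verse))
--             context.extend(c_verse)
--     return x_seq
-- ===== Notes on version B (the rewrite author's own statement) =====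
-- stated objective: simpler
-- what changed: Replaces the per-verse re-flattening of seq[:i] with a single running context accumulator per sequence, copied at each append and extended after; same results, plainer single pass.
import Mathlib
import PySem

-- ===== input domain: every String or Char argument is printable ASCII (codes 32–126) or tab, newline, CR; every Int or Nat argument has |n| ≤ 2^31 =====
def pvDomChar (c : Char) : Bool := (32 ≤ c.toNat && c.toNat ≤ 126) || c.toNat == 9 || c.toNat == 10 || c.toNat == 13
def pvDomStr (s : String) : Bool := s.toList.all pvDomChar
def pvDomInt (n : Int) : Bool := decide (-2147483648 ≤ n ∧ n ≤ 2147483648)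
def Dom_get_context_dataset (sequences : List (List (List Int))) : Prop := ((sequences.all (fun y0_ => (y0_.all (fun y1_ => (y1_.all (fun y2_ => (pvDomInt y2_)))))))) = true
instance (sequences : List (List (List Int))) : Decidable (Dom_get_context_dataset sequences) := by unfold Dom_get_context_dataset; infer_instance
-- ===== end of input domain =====

-- B replaces A's per-verse re-flattening of seq[:i] with one running context accumulator per sequence (simpler: a single pass, no repeated slicing).

-- ===== PORT A =====
-- '[context.extend(v) for v in seq[:i]]' : flatten the slice by a left fold of list extension
def pvFlat (l : List (List Int)) : List Int := l.foldl (fun c v => c ++ v) []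

def get_context_dataset (sequences : List (List (List Int))) : List (List Int × List Int) :=
  sequences.foldl (fun x_seq seq =>
    (PySem.List.enumerate seq 0).foldl (fun x iv =>
      x ++ [(pvFlat (PySem.List.slice seq none (some iv.1)), iv.2)]) x_seq) []

-- ===== PORT B =====
def get_context_dataset_alt (sequences : List (List (List Int))) : List (List Int × List Int) :=
  sequences.foldl (fun x_seq seq =>
    (seq.foldl (fun (st : List (List Int × List Int) × List Int) v =>
      (st.1 ++ [(st.2, v)], st.2 ++ v)) (x_seq, [])).1) []

-- ===== PRECONDITION & SPEC =====
def Spec_get_context_dataset (sequences : List (List (List Int))) (out : List (List Int × List Int)) : Prop := out = get_context_dataset_alt sequences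
instance (sequences : List (List (List Int))) (out : List (List Int × List Int)) : Decidable (Spec_get_context_dataset sequences out) := by unfold Spec_get_context_dataset; infer_instance

-- ===== CLAIM (what is proved, stated in full; the proofs are below) =====
def Claim_equal_get_context_dataset : Prop := ∀ (sequences : List (List (List Int))), Dom_get_context_dataset sequences → Spec_get_context_dataset sequences (get_context_dataset sequences)

-- ===== LEMMAS AND PROOFS =====

theorem pvFlat_snoc (l : List (List Int)) (v : List Int) : pvFlat (l ++ [v]) = pvFlat l ++ v := by
  simp [pvFlat]

theorem inner_eq (seq pre : List (List Int)) (x : List (List Int × List Int)) :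
    (PySem.List.enumerate seq ((pre.length : Int))).foldl (fun x iv =>
      x ++ [(pvFlat (PySem.List.slice (pre ++ seq) none (some iv.1)), iv.2)]) x
    = (seq.foldl (fun (st : List (List Int × List Int) × List Int) v =>
        (st.1 ++ [(st.2, v)], st.2 ++ v)) (x, pvFlat pre)).1 := by
  induction seq generalizing pre x with
  | nil => simp [PySem.List.enumerate_nil]
  | cons v seq ih =>
    rw [PySem.List.enumerate_cons]
    simp only [List.foldl_cons]
    have hslice : PySem.List.slice (pre ++ v :: seq) none (some ((pre.length : Int)))
        = pre := by
      rw [PySem.List.slice_to_natCast]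
      simp
    rw [hslice]
    have hpre : ((pre.length : Int) + 1) = (((pre ++ [v]).length : Int)) := by
      simp
    have := ih (pre ++ [v]) (x ++ [(pvFlat pre, v)])
    rw [hpre]
    rw [show pre ++ v :: seq = (pre ++ [v]) ++ seq by simp]
    rw [this, pvFlat_snoc]

-- ===== VERDICT (by name: the statement is the Claim_ definition above) =====
theorem get_context_dataset_spec : Claim_equal_get_context_dataset := by
  intro sequences _
  unfold Spec_get_context_dataset get_context_dataset get_context_dataset_alt
  congr 1
  funext x_seq seq
  have := inner_eq seq [] x_seq
  simpa [pvFlat] using this
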